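-- pv_equiv track=rewrite | github.com/rabid-unicorn/foobar-resources | OfflineTester/Level2_GearingUpForDestruction/solution8.py | answer
-- ===== SOURCE A (Python) =====
-- def answer(pegs):
--     # no need to check ratios that are too large to fit on the first peg.
--     maximum = pegs[1] - pegs[0] - 1
--     for x in range(1, maximum):
--         # calculate our gear sizes given the first size is x
--         gear_sizes = [x]
--         for peg in range(1, len(pegs)):
--             gear_sizes.append(pegs[peg] - (pegs[peg-1] + gear_sizes[-1]))
--
--         # if any of the gear_sizes are zero or negative, this can't be a potential because obviously
--         # we can't have a non-existent gear. This isn't our answer, so skip this and try the next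
--         # one.
--         if any(d <= 0 for d in gear_sizes):
--             continue
--
--         # see if we got an exact 2/1 match
--         if x == 2 * gear_sizes[-1]:
--             return [x, 1]
--
--         # test if we have a ratio that works with 3 as the denominator
--         if x+1 == 2 * gear_sizes[-1]:
--             return [(x * 3) + 1, 3]
--         if x+2 == 2 * gear_sizes[-1]:
--             return [(x * 3) + 2, 3]
--
--     return [-1, -1]
-- ===== SOURCE B (Python) =====
-- def answer(pegs):
--     # Solve the telescoping linear system directly: the last gear size is
--     # c + s*x (s = +/-1), so each ratio condition pins x to a single
--     # candidate radius, which is checked directly.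
--     n = len(pegs)
--     maximum = pegs[1] - pegs[0] - 1
--     if maximum <= 1:
--         return [-1, -1]  # no radius can fit on the first peg
--     c, s = 0, 1
--     for i in range(1, n):
--         c = pegs[i] - pegs[i - 1] - c
--         s = -s
--
--     def ok(x):
--         if not (1 <= x < maximum):
--             return False
--         g = x
--         for i in range(1, n):
--             g = pegs[i] - pegs[i - 1] - g
--             if g <= 0:
--                 return False
--         return True
--
--     if s == 1:
--         for k in range(3):
--             x = k - 2 * c
--             if ok(x):
--                 return [x, 1] if k == 0 else [3 * x + k, 3]
--     else:
--         x, k = divmod(2 * c, 3)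
--         if ok(x):
--             return [x, 1] if k == 0 else [3 * x + k, 3]
--     return [-1, -1]
-- ===== Notes on version B (the rewrite author's own statement) =====
-- stated objective: alternative
-- what changed: B solves the telescoping linear system in closed form: the last gear size is an affine function c+s*x of the first radius x, so each of A's three ratio conditions pins x to a single candidate radius that B checks directly, instead of A's scan over every radius in range(1, maximum).
-- outside the precondition, e.g. on answer([1]): A raises IndexError, B raises IndexError
import Mathlib
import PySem

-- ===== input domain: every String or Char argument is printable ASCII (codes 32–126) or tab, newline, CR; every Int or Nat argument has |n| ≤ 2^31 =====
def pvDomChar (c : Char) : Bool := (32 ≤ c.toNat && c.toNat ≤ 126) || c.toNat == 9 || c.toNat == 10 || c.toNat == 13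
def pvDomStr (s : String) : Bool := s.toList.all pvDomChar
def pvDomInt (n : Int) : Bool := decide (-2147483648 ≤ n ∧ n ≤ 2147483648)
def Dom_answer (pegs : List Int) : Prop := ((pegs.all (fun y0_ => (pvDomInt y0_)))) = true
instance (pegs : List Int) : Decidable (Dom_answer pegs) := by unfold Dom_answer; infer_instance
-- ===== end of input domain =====

-- B solves the telescoping linear equations for the first gear radius directly
-- instead of A's scan over every candidate radius; objective: alternative.

-- ===== PORT A =====
-- A's inner loop: the gear sizes after the first, from the previous gear size and previous peg
def gearsFrom (g prev : Int) : List Int → List Int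
  | [] => []
  | p :: ps => (p - (prev + g)) :: gearsFrom (p - (prev + g)) p ps

-- gear_sizes[-1] (the list is never empty, so the default is never used)
def lastGear (x p0 : Int) (rest : List Int) : Int := (x :: gearsFrom x p0 rest).getLast?.getD 0

-- A's outer loop over the candidate first radii x, with early returns
def answerLoop (p0 : Int) (rest : List Int) : List Int → List Int
  | [] => [-1, -1]
  | x :: xs =>
    if (x :: gearsFrom x p0 rest).any (fun d => decide (d ≤ 0)) then answerLoop p0 rest xs
    else if x = 2 * lastGear x p0 rest then [x, 1]
    else if x + 1 = 2 * lastGear x p0 rest then [x * 3 + 1, 3]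
    else if x + 2 = 2 * lastGear x p0 rest then [x * 3 + 2, 3]
    else answerLoop p0 rest xs

def answer (pegs : List Int) : List Int :=
  match pegs with
  | p0 :: p1 :: rest => answerLoop p0 (p1 :: rest) (PySem.List.pyRange 1 (p1 - p0 - 1) 1)
  | _ => [-1, -1]  -- unreachable under Pre_answer (Python raises IndexError on fewer than 2 pegs)

-- ===== PORT B =====
-- B's first loop: (c, s) with the last gear size = c + s*x as a function of the first radius x
def csFold (c s prev : Int) : List Int → Int × Int
  | [] => (c, s)
  | p :: ps => csFold (p - prev - c) (-s) p ps

-- the gear-positivity part of B's ok(x)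
def okGears (g prev : Int) : List Int → Bool
  | [] => true
  | p :: ps => if p - prev - g ≤ 0 then false else okGears (p - prev - g) p ps

-- B's ok(x)
def okB (maximum p0 : Int) (rest : List Int) (x : Int) : Bool :=
  if 1 ≤ x ∧ x < maximum then okGears x p0 rest else false

-- B's result for solution x of the k-th ratio equation
def resK (k x : Int) : List Int := if k = 0 then [x, 1] else [3 * x + k, 3]

-- B's `for k in range(3)` loop
def tryKs (maximum p0 : Int) (rest : List Int) (c : Int) : List Int → List Int
  | [] => [-1, -1]
  | k :: ks =>
    if okB maximum p0 rest (k - 2 * c) then resK k (k - 2 * c)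
    else tryKs maximum p0 rest c ks

def answer_alt (pegs : List Int) : List Int :=
  match pegs with
  | [] => [-1, -1]  -- unreachable under Pre_answer
  | [_] => [-1, -1]  -- unreachable under Pre_answer
  | p0 :: p1 :: rest =>
    if p1 - p0 - 1 ≤ 1 then [-1, -1]  -- no radius can fit on the first peg
    else if (csFold 0 1 p0 (p1 :: rest)).2 = 1 then
      tryKs (p1 - p0 - 1) p0 (p1 :: rest) (csFold 0 1 p0 (p1 :: rest)).1 (PySem.List.pyRange 0 3 1)
    else
      if okB (p1 - p0 - 1) p0 (p1 :: rest)
          (PySem.Int.floordiv (2 * (csFold 0 1 p0 (p1 :: rest)).1) 3) then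
        resK (PySem.Int.mod (2 * (csFold 0 1 p0 (p1 :: rest)).1) 3)
          (PySem.Int.floordiv (2 * (csFold 0 1 p0 (p1 :: rest)).1) 3)
      else [-1, -1]

-- ===== PRECONDITION & SPEC =====
-- Pre_ excludes lists with fewer than 2 pegs: there Python A (and B) raises IndexError on pegs[1].
def Pre_answer (pegs : List Int) : Prop := 2 ≤ pegs.length
instance (pegs : List Int) : Decidable (Pre_answer pegs) := by unfold Pre_answer; infer_instance
def pvWitness_answer : List Int := [4, 30, 50]

def Spec_answer (pegs : List Int) (out : List Int) : Prop := out = answer_alt pegs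
instance (pegs : List Int) (out : List Int) : Decidable (Spec_answer pegs out) := by unfold Spec_answer; infer_instance

-- ===== CLAIM (what is proved, stated in full; the proofs are below) =====
def Claim_equal_answer : Prop := ∀ (pegs : List Int), Dom_answer pegs → Pre_answer pegs → Spec_answer pegs (answer pegs)

-- ===== LEMMAS AND PROOFS =====

-- whether A's loop body returns at x, and what it returns there
def fires (p0 : Int) (rest : List Int) (x : Int) : Bool :=
  !((x :: gearsFrom x p0 rest).any (fun d => decide (d ≤ 0))) &&
    (decide (x = 2 * lastGear x p0 rest) || decide (x + 1 = 2 * lastGear x p0 rest)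
      || decide (x + 2 = 2 * lastGear x p0 rest))

def resAt (p0 : Int) (rest : List Int) (x : Int) : List Int :=
  if x = 2 * lastGear x p0 rest then [x, 1]
  else if x + 1 = 2 * lastGear x p0 rest then [x * 3 + 1, 3]
  else if x + 2 = 2 * lastGear x p0 rest then [x * 3 + 2, 3]
  else [-1, -1]

lemma answerLoop_eq_find (p0 : Int) (rest : List Int) (xs : List Int) :
    answerLoop p0 rest xs = ((xs.find? (fires p0 rest)).map (resAt p0 rest)).getD [-1, -1] := by
  induction xs with
  | nil => rfl
  | cons x xs ih =>
    by_cases hA : ((x :: gearsFrom x p0 rest).any (fun d => decide (d ≤ 0))) = true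
    · have hf : ¬ fires p0 rest x = true := by simp [fires, hA]
      simp only [answerLoop]
      rw [if_pos hA, List.find?_cons_of_neg hf, ih]
    · have hA' : ((x :: gearsFrom x p0 rest).any (fun d => decide (d ≤ 0))) = false := by
        simpa using hA
      simp only [answerLoop]
      rw [if_neg hA]
      by_cases h1 : x = 2 * lastGear x p0 rest
      · have hf : fires p0 rest x = true := by
          unfold fires
          rw [hA']
          simp only [Bool.not_false, Bool.true_and, Bool.or_eq_true, decide_eq_true_eq]
          tauto
        rw [if_pos h1, List.find?_cons_of_pos hf]
        simp only [Option.map_some, Option.getD_some, resAt]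
        rw [if_pos h1]
      · rw [if_neg h1]
        by_cases h2 : x + 1 = 2 * lastGear x p0 rest
        · have hf : fires p0 rest x = true := by
            unfold fires
            rw [hA']
            simp only [Bool.not_false, Bool.true_and, Bool.or_eq_true, decide_eq_true_eq]
            tauto
          rw [if_pos h2, List.find?_cons_of_pos hf]
          simp only [Option.map_some, Option.getD_some, resAt]
          rw [if_neg h1, if_pos h2]
        · rw [if_neg h2]
          by_cases h3 : x + 2 = 2 * lastGear x p0 rest
          · have hf : fires p0 rest x = true := by
              unfold fires
              rw [hA']
              simp only [Bool.not_false, Bool.true_and, Bool.or_eq_true, decide_eq_true_eq]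
              tauto
            rw [if_pos h3, List.find?_cons_of_pos hf]
            simp only [Option.map_some, Option.getD_some, resAt]
            rw [if_neg h1, if_neg h2, if_pos h3]
          · have hf : ¬ fires p0 rest x = true := by
              unfold fires
              rw [hA']
              simp only [Bool.not_false, Bool.true_and, Bool.or_eq_true, decide_eq_true_eq]
              tauto
            rw [if_neg h3, List.find?_cons_of_neg hf, ih]

lemma csFold_snd (ps : List Int) : ∀ prev c s, (csFold c s prev ps).2 = s * (csFold 0 1 prev ps).2 := by
  induction ps with
  | nil => intro prev c s; simp [csFold]
  | cons p ps ih =>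
    intro prev c s
    simp only [csFold]
    rw [ih p (p - prev - c) (-s), ih p (p - prev - 0) (-1)]
    ring

lemma csFold_fst (ps : List Int) : ∀ prev c s,
    (csFold c s prev ps).1 = (csFold 0 1 prev ps).1 + (csFold 0 1 prev ps).2 * c := by
  induction ps with
  | nil => intro prev c s; simp [csFold]
  | cons p ps ih =>
    intro prev c s
    simp only [csFold]
    rw [ih p (p - prev - c) (-s), ih p (p - prev - 0) (-1), csFold_snd ps p (p - prev - 0) (-1)]
    ring

lemma csFold_sign (ps : List Int) : ∀ prev,
    (csFold 0 1 prev ps).2 = 1 ∨ (csFold 0 1 prev ps).2 = -1 := by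
  induction ps with
  | nil => intro prev; left; rfl
  | cons p ps ih =>
    intro prev
    simp only [csFold]
    rw [csFold_snd ps p (p - prev - 0) (-1)]
    rcases ih p with h | h <;> rw [h] <;> simp

lemma gears_last (ps : List Int) : ∀ prev g,
    lastGear g prev ps = (csFold 0 1 prev ps).1 + (csFold 0 1 prev ps).2 * g := by
  induction ps with
  | nil => intro prev g; simp [lastGear, gearsFrom, csFold]
  | cons p ps ih =>
    intro prev g
    simp only [lastGear, gearsFrom, csFold, List.getLast?_cons_cons]
    have h := ih p (p - (prev + g))
    simp only [lastGear] at h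
    rw [h, csFold_fst ps p (p - prev - 0) (-1), csFold_snd ps p (p - prev - 0) (-1)]
    ring

lemma any_nonpos_eq (ps : List Int) : ∀ prev g,
    ((g :: gearsFrom g prev ps).any (fun d => decide (d ≤ 0)))
      = (decide (g ≤ 0) || !okGears g prev ps) := by
  induction ps with
  | nil => intro prev g; simp [gearsFrom, okGears]
  | cons p ps ih =>
    intro prev g
    have he : p - (prev + g) = p - prev - g := by ring
    have h2 := ih p (p - prev - g)
    simp only [List.any_cons] at h2
    simp only [gearsFrom, okGears, List.any_cons, he, h2]
    by_cases h : p - prev - g ≤ 0 <;> simp [h]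

lemma okB_iff (m p0 : Int) (rest : List Int) (x : Int) :
    okB m p0 rest x = true ↔ (1 ≤ x ∧ x < m ∧ okGears x p0 rest = true) := by
  unfold okB
  by_cases h : 1 ≤ x ∧ x < m <;> simp [h] <;> tauto

lemma fires_iff (p0 : Int) (rest : List Int) (x : Int) :
    fires p0 rest x = true ↔
      (1 ≤ x ∧ okGears x p0 rest = true ∧
        (x = 2 * ((csFold 0 1 p0 rest).1 + (csFold 0 1 p0 rest).2 * x)
          ∨ x + 1 = 2 * ((csFold 0 1 p0 rest).1 + (csFold 0 1 p0 rest).2 * x)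
          ∨ x + 2 = 2 * ((csFold 0 1 p0 rest).1 + (csFold 0 1 p0 rest).2 * x))) := by
  unfold fires
  rw [any_nonpos_eq rest p0 x, gears_last rest p0 x]
  simp only [Bool.and_eq_true, Bool.not_eq_true', Bool.or_eq_false_iff, Bool.or_eq_true,
    decide_eq_true_eq, decide_eq_false_iff_not]
  constructor
  · rintro ⟨⟨hg, hok⟩, hc⟩
    exact ⟨by omega, by simpa using hok, or_assoc.mp hc⟩
  · rintro ⟨hx, hok, hc⟩
    exact ⟨⟨by omega, by simpa using hok⟩, or_assoc.mpr hc⟩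

lemma resAt_eq (p0 : Int) (rest : List Int) (x k : Int)
    (hk0 : 0 ≤ k) (hk3 : k < 3)
    (heq : x + k = 2 * ((csFold 0 1 p0 rest).1 + (csFold 0 1 p0 rest).2 * x)) :
    resAt p0 rest x = resK k x := by
  unfold resAt resK
  rw [gears_last rest p0 x]
  have hL : 2 * ((csFold 0 1 p0 rest).1 + (csFold 0 1 p0 rest).2 * x) = x + k := heq.symm
  rw [hL]
  by_cases h0 : k = 0
  · subst h0
    rw [if_pos (by omega : x = x + 0), if_pos rfl]
  · by_cases h1 : k = 1
    · subst h1
      rw [if_neg (by omega : ¬ x = x + 1), if_pos rfl, if_neg (by norm_num : ¬ (1:Int) = 0)]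
      have h : x * 3 + 1 = 3 * x + 1 := by ring
      rw [h]
    · have h2 : k = 2 := by omega
      subst h2
      rw [if_neg (by omega : ¬ x = x + 2), if_neg (by omega : ¬ x + 1 = x + 2), if_pos rfl,
        if_neg (by norm_num : ¬ (2:Int) = 0)]
      have h : x * 3 + 2 = 3 * x + 2 := by ring
      rw [h]

lemma find_head (m x : Int) (P : Int → Bool) (hx1 : 1 ≤ x) (hxm : x < m) (hfx : P x = true)
    (hmin : ∀ y, 1 ≤ y → y < x → P y = false) :
    (PySem.List.pyRange 1 m 1).find? P = some x := by
  rw [PySem.List.pyRange_one_append 1 x m (by omega) (by omega), List.find?_append]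
  have h1 : (PySem.List.pyRange 1 x 1).find? P = none := by
    rw [List.find?_eq_none]
    intro y hy
    rw [PySem.List.mem_pyRange_one] at hy
    simp [hmin y hy.1 hy.2]
  rw [h1, PySem.List.pyRange_one_cons (show x < m by omega), List.find?_cons_of_pos hfx]
  rfl

lemma find_none (m : Int) (P : Int → Bool) (h : ∀ y, 1 ≤ y → y < m → P y = false) :
    (PySem.List.pyRange 1 m 1).find? P = none := by
  rw [List.find?_eq_none]
  intro y hy
  rw [PySem.List.mem_pyRange_one] at hy
  simp [h y hy.1 hy.2]

lemma pyRange03 : PySem.List.pyRange 0 3 1 = [0, 1, 2] := by decide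

-- the main case analysis, with the affine coefficients abstracted
lemma main_general (p0 m : Int) (rest : List Int) (C S : Int)
    (hC : (csFold 0 1 p0 rest).1 = C) (hSd : (csFold 0 1 p0 rest).2 = S)
    (hsign : S = 1 ∨ S = -1) :
    (((PySem.List.pyRange 1 m 1).find? (fires p0 rest)).map (resAt p0 rest)).getD [-1, -1]
      = if S = 1 then tryKs m p0 rest C [0, 1, 2]
        else if okB m p0 rest (PySem.Int.floordiv (2 * C) 3) = true then
            resK (PySem.Int.mod (2 * C) 3) (PySem.Int.floordiv (2 * C) 3)
          else [-1, -1] := by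
  rcases hsign with hs1 | hs1
  · -- S = 1: three explicit candidates k - 2*C
    subst hs1
    rw [if_pos rfl]
    have hfwd : ∀ y, fires p0 rest y = true →
        (1 ≤ y ∧ okGears y p0 rest = true ∧ (y = 0 - 2 * C ∨ y = 1 - 2 * C ∨ y = 2 - 2 * C)) := by
      intro y hy
      rw [fires_iff p0 rest y, hC, hSd] at hy
      obtain ⟨u1, u2, u3⟩ := hy
      exact ⟨u1, u2, by omega⟩
    have hfire : ∀ y, (y = 0 - 2 * C ∨ y = 1 - 2 * C ∨ y = 2 - 2 * C) → 1 ≤ y →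
        okGears y p0 rest = true → fires p0 rest y = true := by
      intro y hy h1 h2
      rw [fires_iff p0 rest y, hC, hSd]
      exact ⟨h1, h2, by omega⟩
    simp only [tryKs]
    by_cases h0 : okB m p0 rest (0 - 2 * C) = true
    · rw [if_pos h0]
      obtain ⟨hb1, hb2, hb3⟩ := (okB_iff m p0 rest _).mp h0
      rw [find_head m (0 - 2 * C) _ hb1 hb2 (hfire _ (by tauto) hb1 hb3)
        (fun y hy1 hy2 => by
          cases hPy : fires p0 rest y with
          | false => rfl
          | true => exfalso; obtain ⟨_, _, h⟩ := hfwd y hPy; omega)]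
      simp only [Option.map_some, Option.getD_some]
      exact resAt_eq p0 rest _ 0 (by omega) (by omega) (by rw [hC, hSd]; ring)
    · rw [if_neg h0]
      by_cases h1 : okB m p0 rest (1 - 2 * C) = true
      · rw [if_pos h1]
        obtain ⟨hb1, hb2, hb3⟩ := (okB_iff m p0 rest _).mp h1
        rw [find_head m (1 - 2 * C) _ hb1 hb2 (hfire _ (by tauto) hb1 hb3)
          (fun y hy1 hy2 => by
            cases hPy : fires p0 rest y with
            | false => rfl
            | true =>
              exfalso
              obtain ⟨hf1, hf2, h⟩ := hfwd y hPy
              rcases h with hy | hy | hy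
              · exact h0 ((okB_iff m p0 rest _).mpr ⟨by omega, by omega, hy ▸ hf2⟩)
              · omega
              · omega)]
        simp only [Option.map_some, Option.getD_some]
        exact resAt_eq p0 rest _ 1 (by omega) (by omega) (by rw [hC, hSd]; ring)
      · rw [if_neg h1]
        by_cases h2 : okB m p0 rest (2 - 2 * C) = true
        · rw [if_pos h2]
          obtain ⟨hb1, hb2, hb3⟩ := (okB_iff m p0 rest _).mp h2
          rw [find_head m (2 - 2 * C) _ hb1 hb2 (hfire _ (by tauto) hb1 hb3)
            (fun y hy1 hy2 => by
              cases hPy : fires p0 rest y with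
              | false => rfl
              | true =>
                exfalso
                obtain ⟨hf1, hf2, h⟩ := hfwd y hPy
                rcases h with hy | hy | hy
                · exact h0 ((okB_iff m p0 rest _).mpr ⟨by omega, by omega, hy ▸ hf2⟩)
                · exact h1 ((okB_iff m p0 rest _).mpr ⟨by omega, by omega, hy ▸ hf2⟩)
                · omega)]
          simp only [Option.map_some, Option.getD_some]
          exact resAt_eq p0 rest _ 2 (by omega) (by omega) (by rw [hC, hSd]; ring)
        · rw [if_neg h2]
          rw [find_none m _ (fun y hy1 hy2 => by
            cases hPy : fires p0 rest y with
            | false => rfl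
            | true =>
              exfalso
              obtain ⟨hf1, hf2, h⟩ := hfwd y hPy
              rcases h with hy | hy | hy
              · exact h0 ((okB_iff m p0 rest _).mpr ⟨by omega, by omega, hy ▸ hf2⟩)
              · exact h1 ((okB_iff m p0 rest _).mpr ⟨by omega, by omega, hy ▸ hf2⟩)
              · exact h2 ((okB_iff m p0 rest _).mpr ⟨by omega, by omega, hy ▸ hf2⟩))]
          rfl
  · -- S = -1: the single candidate floordiv (2*C) 3
    subst hs1
    rw [if_neg (by norm_num)]
    set X := PySem.Int.floordiv (2 * C) 3 with hX
    set K := PySem.Int.mod (2 * C) 3 with hK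
    have hdm : X * 3 + K = 2 * C := PySem.Int.floordiv_mul_add_mod (2 * C) 3
    have hk0 : 0 ≤ K := PySem.Int.mod_nonneg (2 * C) (by norm_num)
    have hk3 : K < 3 := PySem.Int.mod_lt (2 * C) (by norm_num)
    have hfwd : ∀ y, fires p0 rest y = true →
        (1 ≤ y ∧ okGears y p0 rest = true ∧ y = X) := by
      intro y hy
      rw [fires_iff p0 rest y, hC, hSd] at hy
      obtain ⟨u1, u2, u3⟩ := hy
      refine ⟨u1, u2, ?_⟩
      rcases u3 with h | h | h <;> omega
    by_cases hok : okB m p0 rest X = true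
    · rw [if_pos hok]
      obtain ⟨hb1, hb2, hb3⟩ := (okB_iff m p0 rest _).mp hok
      have hfx : fires p0 rest X = true := by
        rw [fires_iff p0 rest X, hC, hSd]
        exact ⟨hb1, hb3, by omega⟩
      rw [find_head m X _ hb1 hb2 hfx (fun y hy1 hy2 => by
        cases hPy : fires p0 rest y with
        | false => rfl
        | true => exfalso; obtain ⟨_, _, h⟩ := hfwd y hPy; omega)]
      simp only [Option.map_some, Option.getD_some]
      exact resAt_eq p0 rest X K hk0 hk3 (by rw [hC, hSd]; omega)
    · rw [if_neg hok]
      rw [find_none m _ (fun y hy1 hy2 => by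
        cases hPy : fires p0 rest y with
        | false => rfl
        | true =>
          exfalso
          obtain ⟨hf1, hf2, hy⟩ := hfwd y hPy
          exact hok ((okB_iff m p0 rest _).mpr ⟨by omega, by omega, hy ▸ hf2⟩))]
      rfl

lemma answer_eq_alt (p0 p1 : Int) (rs : List Int) :
    answer (p0 :: p1 :: rs) = answer_alt (p0 :: p1 :: rs) := by
  by_cases hm : p1 - p0 - 1 ≤ 1
  · have he : PySem.List.pyRange 1 (p1 - p0 - 1) 1 = [] := by
      rw [PySem.List.pyRange_one]
      have h0 : (p1 - p0 - 1 - 1).toNat = 0 := by omega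
      rw [h0]
      rfl
    simp only [answer, answer_alt, he, if_pos hm]
    rfl
  · have h := main_general p0 (p1 - p0 - 1) (p1 :: rs) (csFold 0 1 p0 (p1 :: rs)).1
      (csFold 0 1 p0 (p1 :: rs)).2 rfl rfl (csFold_sign (p1 :: rs) p0)
    simp only [answer]
    rw [answerLoop_eq_find, h]
    simp only [answer_alt, pyRange03, if_neg hm]

-- ===== VERDICT (by name: the statement is the Claim_ definition above) =====
theorem answer_spec : Claim_equal_answer := by
  intro pegs _ hpre
  unfold Spec_answer
  match pegs, hpre with
  | p0 :: p1 :: rs, _ => exact answer_eq_alt p0 p1 rs
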